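-- pv_equiv track=rewrite | github.com/GundalaNikhil/DSA | dsa-problems/generate_stringsclassic_testcases_complete.py | longest_palindrome_one_wildcard
-- ===== SOURCE A (Python) =====
-- def longest_palindrome_one_wildcard(s):
--     """Find longest palindrome with at most one wildcard change."""
--     n = len(s)
--     max_len = 1
--
--     # Check all substrings
--     for i in range(n):
--         for j in range(i + 1, n + 1):
--             substr = s[i:j]
--             mismatches = 0
--             left, right = 0, len(substr) - 1
--
--             while left < right:
--                 if substr[left] != substr[right]:
--                     mismatches += 1
--                 left += 1
--                 right -= 1
--
--             if mismatches <= 1: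
--                 max_len = max(max_len, len(substr))
--
--     return max_len
-- ===== SOURCE B (Python) =====
-- def longest_palindrome_one_wildcard(s):
--     """Find longest palindrome with at most one wildcard change."""
--     n = len(s)
--     best = 1
--     for c in range(n):
--         for r0 in (c, c + 1):
--             l, r, mis = c, r0, 0
--             while l >= 0 and r < n:
--                 if s[l] != s[r]:
--                     mis += 1
--                 if mis > 1:
--                     break
--                 best = max(best, r - l + 1)
--                 l -= 1
--                 r += 1
--     return best
-- ===== Notes on version B (the rewrite author's own statement) =====
-- stated objective: faster
-- what changed: Replaces the enumerate-all-substrings-and-scan-each O(n^3) loop with expansion around each of the 2n palindrome centers, accumulating mismatches outward and stopping once more than one pair mismatches.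
import Mathlib
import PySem

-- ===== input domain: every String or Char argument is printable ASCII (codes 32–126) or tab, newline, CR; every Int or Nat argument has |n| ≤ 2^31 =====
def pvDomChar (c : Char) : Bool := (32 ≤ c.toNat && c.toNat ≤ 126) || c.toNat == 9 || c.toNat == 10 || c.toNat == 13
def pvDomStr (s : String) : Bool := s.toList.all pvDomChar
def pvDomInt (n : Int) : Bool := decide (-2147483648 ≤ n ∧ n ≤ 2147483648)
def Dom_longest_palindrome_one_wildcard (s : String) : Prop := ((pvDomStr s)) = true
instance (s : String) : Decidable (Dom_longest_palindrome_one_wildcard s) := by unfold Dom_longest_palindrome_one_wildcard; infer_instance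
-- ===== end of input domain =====

-- B replaces A's scan of every substring (O(n^3)) by expansion around each palindrome center
-- counting mismatched pairs outward (O(n^2)); same return value on every input.

-- ===== PORT A =====
-- A's inner `while left < right` two-pointer mismatch count over the substring.
def aWhile (sub : List Char) (left right mism : Int) : Int :=
  if left < right then
    aWhile sub (left + 1) (right - 1)
      (if PySem.List.pyGetD sub left ' ' ≠ PySem.List.pyGetD sub right ' ' then mism + 1 else mism)
  else mism
termination_by (right - left).toNat
decreasing_by omega

def longest_palindrome_one_wildcard (s : String) : Int :=
  let lc := s.toList
  let n : Int := lc.length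
  (PySem.List.pyRange 0 n 1).foldl (fun max_len i =>
    (PySem.List.pyRange (i + 1) (n + 1) 1).foldl (fun max_len j =>
      let substr := PySem.List.slice lc (some i) (some j)
      let mismatches := aWhile substr 0 ((substr.length : Int) - 1) 0
      if mismatches ≤ 1 then max max_len (substr.length : Int) else max_len) max_len) 1

-- ===== PORT B =====
-- B's `if s[l] != s[r]: mis += 1` update
def bMis (lc : List Char) (lo r mis : Int) : Int :=
  if PySem.List.pyGetD lc lo ' ' ≠ PySem.List.pyGetD lc r ' ' then mis + 1 else mis

-- B's `while l >= 0 and r < n` expansion from a center, breaking past one mismatch.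
def bWhile (lc : List Char) (n lo r mis best : Int) : Int :=
  if 0 ≤ lo ∧ r < n then
    if 1 < bMis lc lo r mis then best
    else bWhile lc n (lo - 1) (r + 1) (bMis lc lo r mis) (max best (r - lo + 1))
  else best
termination_by (n - r).toNat
decreasing_by omega

def longest_palindrome_one_wildcard_alt (s : String) : Int :=
  let lc := s.toList
  let n : Int := lc.length
  (PySem.List.pyRange 0 n 1).foldl (fun best c =>
    [c, c + 1].foldl (fun best r0 => bWhile lc n c r0 0 best) best) 1

-- ===== PRECONDITION & SPEC =====
def Spec_longest_palindrome_one_wildcard (s : String) (out : Int) : Prop := out = longest_palindrome_one_wildcard_alt s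
instance (s : String) (out : Int) : Decidable (Spec_longest_palindrome_one_wildcard s out) := by unfold Spec_longest_palindrome_one_wildcard; infer_instance

-- ===== CLAIM (what is proved, stated in full; the proofs are below) =====
def Claim_equal_longest_palindrome_one_wildcard : Prop := ∀ (s : String), Dom_longest_palindrome_one_wildcard s → Spec_longest_palindrome_one_wildcard s (longest_palindrome_one_wildcard s)

-- ===== LEMMAS AND PROOFS =====

-- number of mismatched pairs of the inclusive window [a, b]
def mismN (lc : List Char) (a b : Nat) : Nat :=
  if a < b then
    (if lc.getD a ' ' ≠ lc.getD b ' ' then 1 else 0) + mismN lc (a + 1) (b - 1)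
  else 0
termination_by b - a
decreasing_by omega

def Good (lc : List Char) (a b : Nat) : Prop :=
  a ≤ b ∧ b < lc.length ∧ mismN lc a b ≤ 1

-- m is 1 or the length of some Good window
def PV (lc : List Char) (m : Int) : Prop :=
  m = 1 ∨ ∃ a b, Good lc a b ∧ m = (b : Int) + 1 - (a : Int)

-- m is the maximum of 1 and the lengths of all Good windows
def IsOpt (lc : List Char) (m : Int) : Prop :=
  PV lc m ∧ (1 ≤ m ∧ ∀ a b, Good lc a b → (b : Int) + 1 - (a : Int) ≤ m)

theorem isOpt_unique {lc : List Char} {m m' : Int} (h : IsOpt lc m) (h' : IsOpt lc m') : m = m' := by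
  obtain ⟨ha, h1, hub⟩ := h
  obtain ⟨ha', h1', hub'⟩ := h'
  unfold PV at ha ha'
  have hle : m ≤ m' := by
    rcases ha with rfl | ⟨a, b, hg, rfl⟩
    · exact h1'
    · exact hub' a b hg
  have hge : m' ≤ m := by
    rcases ha' with rfl | ⟨a, b, hg, rfl⟩
    · exact h1
    · exact hub a b hg
  omega

-- ---- generic foldl toolkit ----
theorem foldl_ge_init {α : Type} (f : Int → α → Int) (h : ∀ m x, m ≤ f m x) :
    ∀ (xs : List α) (init : Int), init ≤ xs.foldl f init := by
  intro xs
  induction xs with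
  | nil => intro init; simp
  | cons x xs ih => intro init; exact le_trans (h init x) (ih (f init x))

theorem foldl_inv {α : Type} (f : Int → α → Int) (P : Int → Prop) :
    ∀ (xs : List α) (init : Int), (∀ x ∈ xs, ∀ m, P m → P (f m x)) → P init →
      P (xs.foldl f init) := by
  intro xs
  induction xs with
  | nil => intro init _ hi; simpa using hi
  | cons x xs ih =>
      intro init h hi
      exact ih (f init x) (fun y hy m hm => h y (List.mem_cons_of_mem _ hy) m hm)
        (h x List.mem_cons_self init hi)

theorem foldl_reach {α : Type} (f : Int → α → Int) (t : Int) {x : α} :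
    ∀ (xs : List α) (init : Int), x ∈ xs → (∀ m y, m ≤ f m y) → (∀ m, t ≤ f m x) →
      t ≤ xs.foldl f init := by
  intro xs
  induction xs with
  | nil => intro init hx; simp at hx
  | cons y ys ih =>
      intro init hx hmono hreach
      rcases List.mem_cons.mp hx with rfl | hx'
      · exact le_trans (hreach init) (foldl_ge_init f (fun m z => hmono m z) ys (f init x))
      · exact ih (f init y) hx' hmono hreach

-- ---- mismN facts ----
theorem mismN_of_not_lt {lc : List Char} {a b : Nat} (h : ¬ a < b) : mismN lc a b = 0 := by
  rw [mismN]; simp [h]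

theorem mismN_step {lc : List Char} {a b : Nat} (h : a < b) :
    mismN lc a b = (if lc.getD a ' ' ≠ lc.getD b ' ' then 1 else 0) + mismN lc (a + 1) (b - 1) := by
  rw [mismN]; simp [h]

-- shrinking a window symmetrically never increases the mismatch count
theorem mismN_le_shrink (lc : List Char) :
    ∀ (k a b a' b' : Nat), a' - a ≤ k → a ≤ a' → b' ≤ b → a' ≤ b' → a' - a = b - b' →
      mismN lc a' b' ≤ mismN lc a b := by
  intro k
  induction k with
  | zero =>
      intro a b a' b' hk ha hb hab hsym
      have : a' = a := by omega
      have : b' = b := by omega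
      subst_vars; omega
  | succ k ih =>
      intro a b a' b' hk ha hb hab hsym
      by_cases hcase : a' = a
      · have : b' = b := by omega
        subst_vars; omega
      · have hlt : a < b := by omega
        rw [mismN_step hlt]
        have := ih (a + 1) (b - 1) a' b' (by omega) (by omega) (by omega) hab (by omega)
        omega

-- ---- A-side bridges ----
theorem aWhile_eq (sub : List Char) :
    ∀ (k l r : Nat) (m : Int), r - l ≤ k → r < sub.length →
      aWhile sub (l : Int) (r : Int) m = m + (mismN sub l r : Int) := by
  intro k
  induction k with
  | zero =>
      intro l r m hk hr
      have hnl : ¬ (l : Int) < (r : Int) := by omega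
      rw [aWhile]; simp only [hnl, if_false]
      rw [mismN_of_not_lt (by omega)]; simp
  | succ k ih =>
      intro l r m hk hr
      by_cases hlr : l < r
      · have hlr' : (l : Int) < (r : Int) := by exact_mod_cast hlr
        rw [aWhile]; simp only [hlr', if_true]
        have e1 : (l : Int) + 1 = ((l + 1 : Nat) : Int) := by push_cast; ring
        have e2 : (r : Int) - 1 = ((r - 1 : Nat) : Int) := by omega
        rw [e1, e2, ih (l + 1) (r - 1) _ (by omega) (by omega)]
        rw [mismN_step hlr]
        rw [PySem.List.pyGetD_natCast, PySem.List.pyGetD_natCast]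
        push_cast
        split_ifs with hc <;> ring
      · have hnl : ¬ (l : Int) < (r : Int) := by omega
        rw [aWhile]; simp only [hnl, if_false]
        rw [mismN_of_not_lt (by omega)]; simp

theorem getD_drop_take {lc : List Char} {i m k : Nat} (hk : k < m) (hm : i + m ≤ lc.length) :
    ((lc.drop i).take m).getD k ' ' = lc.getD (i + k) ' ' := by
  have h1 : k < ((lc.drop i).take m).length := by
    simp [List.length_take, List.length_drop]; omega
  have h2 : i + k < lc.length := by omega
  rw [List.getD_eq_getElem _ _ h1, List.getD_eq_getElem _ _ h2]
  rw [List.getElem_take, List.getElem_drop]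

theorem mismN_slice (lc : List Char) (i m : Nat) (hm : i + m ≤ lc.length) :
    ∀ (k a b : Nat), b - a ≤ k → b < m →
      mismN ((lc.drop i).take m) a b = mismN lc (i + a) (i + b) := by
  intro k
  induction k with
  | zero =>
      intro a b hk hb
      rw [mismN_of_not_lt (by omega), mismN_of_not_lt (by omega)]
  | succ k ih =>
      intro a b hk hb
      by_cases hab : a < b
      · rw [mismN_step hab, mismN_step (by omega : i + a < i + b)]
        rw [getD_drop_take (by omega) hm, getD_drop_take (by omega) hm]
        rw [ih (a + 1) (b - 1) (by omega) (by omega)]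
        rw [show i + (a + 1) = i + a + 1 from by omega,
            show i + (b - 1) = i + b - 1 from by omega]
      · rw [mismN_of_not_lt hab, mismN_of_not_lt (by omega)]

-- the value A's inner loop computes for the pair (i, j) = (a, b+1), 0 ≤ a ≤ b < |lc|
theorem a_cond_eq (lc : List Char) (a b : Nat) (hab : a ≤ b) (hb : b < lc.length) :
    aWhile (PySem.List.slice lc (some (a : Int)) (some ((b : Int) + 1))) 0
        (((PySem.List.slice lc (some (a : Int)) (some ((b : Int) + 1))).length : Int) - 1) 0
      = (mismN lc a b : Int) := by
  have hsl : PySem.List.slice lc (some (a : Int)) (some ((b : Int) + 1))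
      = (lc.drop a).take (b + 1 - a) := by
    have : (b : Int) + 1 = ((b + 1 : Nat) : Int) := by push_cast; ring
    rw [this, PySem.List.slice_natCast]
  rw [hsl]
  have hlen : ((lc.drop a).take (b + 1 - a)).length = b + 1 - a := by
    simp [List.length_take, List.length_drop]; omega
  rw [hlen]
  have e : ((b + 1 - a : Nat) : Int) - 1 = ((b - a : Nat) : Int) := by omega
  have h := aWhile_eq ((lc.drop a).take (b + 1 - a)) (b - a) 0 (b - a) 0 le_rfl
    (by rw [hlen]; omega)
  simp only [Nat.cast_zero] at h
  rw [e, h]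
  rw [mismN_slice lc a (b + 1 - a) (by omega) (b - a) 0 (b - a) le_rfl (by omega)]
  rw [show a + 0 = a from by omega, show a + (b - a) = b from by omega]
  ring

-- ---- B-side bridges ----
theorem bMis_step (lc : List Char) {lo r : Int} (h0 : 0 ≤ lo) (hlr : lo ≤ r) (hr : r < (lc.length : Int)) :
    bMis lc lo r (mismN lc (lo + 1).toNat (r - 1).toNat : Int)
      = (mismN lc lo.toNat r.toNat : Int) := by
  unfold bMis
  rw [PySem.List.pyGetD_of_nonneg lc ' ' h0, PySem.List.pyGetD_of_nonneg lc ' ' (by omega)]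
  by_cases hcase : lo < r
  · have h1 : lo.toNat < r.toNat := by omega
    rw [mismN_step h1]
    rw [show (lo + 1).toNat = lo.toNat + 1 from by omega,
        show (r - 1).toNat = r.toNat - 1 from by omega]
    push_cast
    split_ifs with hc <;> ring
  · have heq : lo = r := by omega
    subst heq
    rw [mismN_of_not_lt (by omega : ¬ (lo + 1).toNat < (lo - 1).toNat),
        mismN_of_not_lt (by omega : ¬ lo.toNat < lo.toNat)]
    simp

theorem bw_mono (lc : List Char) (n : Int) :
    ∀ (fuel : Nat) (lo r mis best : Int), (n - r).toNat ≤ fuel → best ≤ bWhile lc n lo r mis best := by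
  intro fuel
  induction fuel with
  | zero =>
      intro lo r mis best hf
      rw [bWhile]
      split
      · next h => omega
      · exact le_rfl
  | succ k ih =>
      intro lo r mis best hf
      rw [bWhile]
      split
      · next h =>
          split
          · exact le_rfl
          · exact le_trans (le_max_left _ _) (ih (lo - 1) (r + 1) _ _ (by omega))
      · exact le_rfl

theorem bw_inv (lc : List Char) :
    ∀ (fuel : Nat) (lo r best : Int), ((lc.length : Int) - r).toNat ≤ fuel →
      lo ≤ r → PV lc best →
      PV lc (bWhile lc (lc.length : Int) lo r (mismN lc (lo + 1).toNat (r - 1).toNat : Int) best) := by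
  intro fuel
  induction fuel with
  | zero =>
      intro lo r best hf hlr hb
      rw [bWhile]
      split
      · next h => omega
      · exact hb
  | succ k ih =>
      intro lo r best hf hlr hb
      rw [bWhile]
      split
      · next h =>
          obtain ⟨h0, hr⟩ := h
          rw [bMis_step lc h0 hlr hr]
          split
          · exact hb
          · next hnb =>
              have hmle : (mismN lc lo.toNat r.toNat : Int) ≤ 1 := by omega
              have hgood : Good lc lo.toNat r.toNat :=
                ⟨by omega, by omega, by exact_mod_cast hmle⟩
              have hPbest' : PV lc (max best (r - lo + 1)) := by
                rcases max_choice best (r - lo + 1) with hmc | hmc <;> rw [hmc]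
                · exact hb
                · exact Or.inr ⟨lo.toNat, r.toNat, hgood, by omega⟩
              have hrec := ih (lo - 1) (r + 1) (max best (r - lo + 1)) (by omega) (by omega)
                hPbest'
              rw [show (lo - 1 + 1).toNat = lo.toNat from by omega,
                  show (r + 1 - 1).toNat = r.toNat from by omega] at hrec
              exact hrec
      · exact hb

theorem bw_reach (lc : List Char) {a b : Nat} (hg : Good lc a b) :
    ∀ (fuel : Nat) (lo r best : Int), ((b : Int) - r).toNat ≤ fuel →
      (a : Int) ≤ lo → r ≤ (b : Int) → lo - (a : Int) = (b : Int) - r → lo ≤ r →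
      (b : Int) + 1 - (a : Int)
        ≤ bWhile lc (lc.length : Int) lo r (mismN lc (lo + 1).toNat (r - 1).toNat : Int) best := by
  obtain ⟨hab, hb, hm⟩ := hg
  have hgood : Good lc a b := ⟨hab, hb, hm⟩
  intro fuel
  induction fuel with
  | zero =>
      intro lo r best hf ha hrb hsym hlr
      have hr : r = (b : Int) := by omega
      have hlo : lo = (a : Int) := by omega
      subst hr; subst hlo
      rw [bWhile]
      rw [if_pos (⟨by omega, by exact_mod_cast hb⟩ : 0 ≤ (a : Int) ∧ (b : Int) < (lc.length : Int))]
      rw [bMis_step lc (by omega) (by omega) (by exact_mod_cast hb)]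
      rw [show ((a : Int)).toNat = a from by omega, show ((b : Int)).toNat = b from by omega]
      rw [if_neg (by exact_mod_cast Nat.not_lt.mpr hm)]
      exact le_trans (by omega : (b : Int) + 1 - (a : Int) ≤ max best ((b : Int) - (a : Int) + 1))
        (bw_mono lc _ ((lc.length : Int) - ((b : Int) + 1)).toNat _ _ _ _ le_rfl)
  | succ k ih =>
      intro lo r best hf ha hrb hsym hlr
      by_cases hr : r = (b : Int)
      · have hlo : lo = (a : Int) := by omega
        subst hr; subst hlo
        rw [bWhile]
        rw [if_pos (⟨by omega, by exact_mod_cast hb⟩ : 0 ≤ (a : Int) ∧ (b : Int) < (lc.length : Int))]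
        rw [bMis_step lc (by omega) (by omega) (by exact_mod_cast hb)]
        rw [show ((a : Int)).toNat = a from by omega, show ((b : Int)).toNat = b from by omega]
        rw [if_neg (by exact_mod_cast Nat.not_lt.mpr hm)]
        exact le_trans (by omega : (b : Int) + 1 - (a : Int) ≤ max best ((b : Int) - (a : Int) + 1))
          (bw_mono lc _ ((lc.length : Int) - ((b : Int) + 1)).toNat _ _ _ _ le_rfl)
      · have hrb' : r < (b : Int) := by omega
        have h0lo : 0 ≤ lo := by omega
        have hrlen : r < (lc.length : Int) := by
          have : (b : Int) < (lc.length : Int) := by exact_mod_cast hb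
          omega
        rw [bWhile, if_pos ⟨h0lo, hrlen⟩]
        rw [bMis_step lc h0lo hlr hrlen]
        have hshrink : mismN lc lo.toNat r.toNat ≤ mismN lc a b :=
          mismN_le_shrink lc (lo.toNat - a) a b lo.toNat r.toNat le_rfl (by omega) (by omega)
            (by omega) (by omega)
        rw [if_neg (by
          have : mismN lc lo.toNat r.toNat ≤ 1 := le_trans hshrink hm
          have : (mismN lc lo.toNat r.toNat : Int) ≤ 1 := by exact_mod_cast this
          omega)]
        have hrec := ih (lo - 1) (r + 1) (max best (r - lo + 1)) (by omega) (by omega)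
          (by omega) (by omega) (by omega)
        rw [show (lo - 1 + 1).toNat = lo.toNat from by omega,
            show (r + 1 - 1).toNat = r.toNat from by omega] at hrec
        exact hrec


-- ---- the two ports seen as folds ----
def aInner (lc : List Char) (i m j : Int) : Int :=
  if aWhile (PySem.List.slice lc (some i) (some j)) 0
      (((PySem.List.slice lc (some i) (some j)).length : Int) - 1) 0 ≤ 1
  then max m ((PySem.List.slice lc (some i) (some j)).length : Int) else m

def aOuter (lc : List Char) (m i : Int) : Int :=
  (PySem.List.pyRange (i + 1) ((lc.length : Int) + 1) 1).foldl (aInner lc i) m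

def bOuter (lc : List Char) (m c : Int) : Int :=
  [c, c + 1].foldl (fun best r0 => bWhile lc (lc.length : Int) c r0 0 best) m

theorem aInner_mono (lc : List Char) (i : Int) : ∀ (m j : Int), m ≤ aInner lc i m j := by
  intro m j
  unfold aInner
  split
  · exact le_max_left _ _
  · exact le_rfl

theorem aOuter_mono (lc : List Char) : ∀ (m i : Int), m ≤ aOuter lc m i := by
  intro m i
  exact foldl_ge_init (aInner lc i) (aInner_mono lc i) _ m

theorem bOuter_mono (lc : List Char) : ∀ (m c : Int), m ≤ bOuter lc m c := by
  intro m c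
  exact foldl_ge_init _
    (fun m' r0 => bw_mono lc (lc.length : Int) (((lc.length : Int) - r0).toNat) c r0 0 m' le_rfl)
    [c, c + 1] m

theorem slice_len_int (lc : List Char) {a b : Nat} (hab : a ≤ b) (hb : b < lc.length) :
    (((PySem.List.slice lc (some (a : Int)) (some ((b : Int) + 1))).length : Nat) : Int)
      = (b : Int) + 1 - (a : Int) := by
  have hsl : PySem.List.slice lc (some (a : Int)) (some ((b : Int) + 1))
      = (lc.drop a).take (b + 1 - a) := by
    rw [show (b : Int) + 1 = ((b + 1 : Nat) : Int) from by push_cast; ring,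
        PySem.List.slice_natCast]
  rw [hsl]
  have : ((lc.drop a).take (b + 1 - a)).length = b + 1 - a := by
    simp [List.length_take, List.length_drop]; omega
  rw [this]; omega

-- ---- A is optimal ----
theorem a_isOpt (s : String) : IsOpt s.toList (longest_palindrome_one_wildcard s) := by
  have hA : longest_palindrome_one_wildcard s
      = (PySem.List.pyRange 0 (s.toList.length : Int) 1).foldl (aOuter s.toList) 1 := rfl
  rw [hA]
  refine ⟨?_, ?_, ?_⟩
  · -- achieves: every intermediate value is 1 or a Good-window length
    refine foldl_inv (aOuter s.toList) (PV s.toList) _ 1 ?_ (Or.inl rfl)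
    intro i hi m hm
    obtain ⟨hi0, hin⟩ := (PySem.List.mem_pyRange_one).mp hi
    unfold aOuter
    refine foldl_inv _ (PV s.toList) _ m ?_ hm
    intro j hj m' hm'
    obtain ⟨hj1, hj2⟩ := (PySem.List.mem_pyRange_one).mp hj
    unfold aInner
    split
    · next hcond =>
        have hi' : i = ((i.toNat : Nat) : Int) := by omega
        have hj' : j = (((j - 1).toNat : Nat) : Int) + 1 := by omega
        rw [hi', hj'] at hcond ⊢
        rw [a_cond_eq s.toList i.toNat (j - 1).toNat (by omega) (by omega)] at hcond
        have hg : Good s.toList i.toNat (j - 1).toNat :=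
          ⟨by omega, by omega, by exact_mod_cast hcond⟩
        rcases max_choice m'
            (((PySem.List.slice s.toList (some ((i.toNat : Nat) : Int))
              (some ((((j - 1).toNat : Nat) : Int) + 1))).length : Int)) with hmc | hmc <;>
          rw [hmc]
        · exact hm'
        · exact Or.inr ⟨_, _, hg, by rw [slice_len_int s.toList (by omega) (by omega)]⟩
    · next => exact hm'
  · exact foldl_ge_init (aOuter s.toList) (aOuter_mono s.toList) _ 1
  · -- every Good window length is reached
    intro a b hg
    obtain ⟨hab, hb, hm⟩ := hg
    refine foldl_reach (aOuter s.toList) _ (x := (a : Int)) _ 1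
      ((PySem.List.mem_pyRange_one).mpr ⟨by omega, by omega⟩)
      (fun m y => aOuter_mono s.toList m y) ?_
    intro m
    unfold aOuter
    refine foldl_reach _ _ (x := (b : Int) + 1) _ m
      ((PySem.List.mem_pyRange_one).mpr ⟨by omega, by omega⟩)
      (fun m' y => aInner_mono s.toList _ m' y) ?_
    intro m'
    unfold aInner
    rw [a_cond_eq s.toList a b hab hb]
    rw [if_pos (by exact_mod_cast hm : (mismN s.toList a b : Int) ≤ 1)]
    rw [slice_len_int s.toList hab hb]
    exact le_max_right _ _

-- ---- B is optimal ----
theorem b_isOpt (s : String) : IsOpt s.toList (longest_palindrome_one_wildcard_alt s) := by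
  have hB : longest_palindrome_one_wildcard_alt s
      = (PySem.List.pyRange 0 (s.toList.length : Int) 1).foldl (bOuter s.toList) 1 := rfl
  rw [hB]
  refine ⟨?_, ?_, ?_⟩
  · -- achieves: the expansion only records Good-window lengths
    refine foldl_inv (bOuter s.toList) (PV s.toList) _ 1 ?_ (Or.inl rfl)
    intro c hc m hm
    obtain ⟨hc0, hcn⟩ := (PySem.List.mem_pyRange_one).mp hc
    unfold bOuter
    refine foldl_inv _ (PV s.toList) _ m ?_ hm
    intro r0 hr0 best hPb
    have hr : r0 = c ∨ r0 = c + 1 := by simpa using hr0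
    have h0 : (0 : Int) = ((mismN s.toList (c + 1).toNat (r0 - 1).toNat : Nat) : Int) := by
      rw [mismN_of_not_lt (by omega)]; simp
    rw [h0]
    exact bw_inv s.toList (((s.toList.length : Int) - r0).toNat) c r0 best le_rfl (by omega) hPb
  · exact foldl_ge_init (bOuter s.toList) (bOuter_mono s.toList) _ 1
  · -- every Good window is reached from its center
    intro a b hg
    obtain ⟨hab, hb, hm⟩ := hg
    have hc2 : 2 * ((a + b) / 2) ≤ a + b ∧ a + b ≤ 2 * ((a + b) / 2) + 1 := by omega
    refine foldl_reach (bOuter s.toList) _ (x := (((a + b) / 2 : Nat) : Int)) _ 1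
      ((PySem.List.mem_pyRange_one).mpr ⟨by omega, by omega⟩)
      (fun m y => bOuter_mono s.toList m y) ?_
    intro m
    unfold bOuter
    by_cases hp : (a + b) % 2 = 0
    · -- even gap: odd-length center (c, c)
      refine foldl_reach _ _ (x := (((a + b) / 2 : Nat) : Int)) _ m (by simp)
        (fun m' y => bw_mono s.toList _ (((s.toList.length : Int) - y).toNat) _ y 0 m' le_rfl) ?_
      intro best
      have h0 : (0 : Int) = ((mismN s.toList ((((a + b) / 2 : Nat) : Int) + 1).toNat
          ((((a + b) / 2 : Nat) : Int) - 1).toNat : Nat) : Int) := by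
        rw [mismN_of_not_lt (by omega)]; simp
      rw [h0]
      exact bw_reach s.toList ⟨hab, hb, hm⟩ (((b : Int) - ((a + b) / 2 : Nat)).toNat)
        _ _ best le_rfl (by omega) (by omega) (by omega) (by omega)
    · -- odd gap: even-length center (c, c + 1)
      refine foldl_reach _ _ (x := (((a + b) / 2 : Nat) : Int) + 1) _ m (by simp)
        (fun m' y => bw_mono s.toList _ (((s.toList.length : Int) - y).toNat) _ y 0 m' le_rfl) ?_
      intro best
      have h0 : (0 : Int) = ((mismN s.toList ((((a + b) / 2 : Nat) : Int) + 1).toNat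
          (((((a + b) / 2 : Nat) : Int) + 1) - 1).toNat : Nat) : Int) := by
        rw [mismN_of_not_lt (by omega)]; simp
      rw [h0]
      exact bw_reach s.toList ⟨hab, hb, hm⟩ (((b : Int) - (((a + b) / 2 : Nat) + 1)).toNat)
        _ _ best le_rfl (by omega) (by omega) (by omega) (by omega)

-- ===== VERDICT (by name: the statement is the Claim_ definition above) =====
theorem longest_palindrome_one_wildcard_spec : Claim_equal_longest_palindrome_one_wildcard := by
  intro s _
  unfold Spec_longest_palindrome_one_wildcard
  exact isOpt_unique (a_isOpt s) (b_isOpt s)
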